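-- pv_equiv track=rewrite | github.com/mguedes71/green_chemistry | gwape_eval.py | string_comparison
-- ===== SOURCE A (Python) =====
-- def string_comparison(a: str, b: str) -> bool:
--     """Compare two strings after eliminating redundant characters.
--
--     Args:
--         a (str): First string
--         b (str): Second string
--
--     Returns:
--         bool: Whehter they are they same.
--     """
--
--     # (i) Convert to lower-case
--     a = a.lower()
--     b = b.lower()
--
--     # (ii)  Eliminate error-pronce characters
--     drop_characters = ["-", "/", "_", ","]
--
--     for c in drop_characters:
--         a = a.replace(c, "")
--         b = b.replace(c, "")
--
--     # (iii) Eliminate all whitespaces and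
--     a = a.replace(" ", "")
--     b = b.replace(" ", "")
--
--     return a == b
-- ===== SOURCE B (Python) =====
-- def string_comparison(a: str, b: str) -> bool:
--     """Compare two strings after eliminating redundant characters.
--
--     Single pass with two cursors: skip over ignorable characters in each
--     string and compare the remaining characters case-insensitively.
--     """
--     drop = {"-", "/", "_", ",", " "}
--     i, j = 0, 0
--     while True:
--         while i < len(a) and a[i] in drop:
--             i += 1
--         while j < len(b) and b[j] in drop:
--             j += 1
--         if i == len(a) or j == len(b):
--             return i == len(a) and j == len(b)
--         if a[i].lower() != b[j].lower():
--             return False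
--         i += 1
--         j += 1
-- ===== Notes on version B (the rewrite author's own statement) =====
-- stated objective: alternative
-- what changed: A lowercases both strings and builds two cleaned copies via five successive str.replace passes before comparing; B makes a single simultaneous scan with two cursors, skipping ignorable characters and comparing the remaining characters case-insensitively, with no intermediate strings.
import Mathlib
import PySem

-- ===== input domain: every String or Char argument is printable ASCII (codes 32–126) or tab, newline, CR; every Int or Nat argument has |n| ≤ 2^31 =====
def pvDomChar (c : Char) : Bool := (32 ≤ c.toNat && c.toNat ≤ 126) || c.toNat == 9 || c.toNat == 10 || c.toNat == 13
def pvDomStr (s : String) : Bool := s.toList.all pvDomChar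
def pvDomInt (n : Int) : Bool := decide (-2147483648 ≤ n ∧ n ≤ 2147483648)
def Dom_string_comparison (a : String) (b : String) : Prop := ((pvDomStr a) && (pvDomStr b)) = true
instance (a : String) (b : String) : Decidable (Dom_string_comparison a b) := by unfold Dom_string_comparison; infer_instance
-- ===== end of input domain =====

-- B rewrites A's build-two-cleaned-strings-and-compare as a single two-cursor scan
-- that skips ignorable characters and compares the rest case-insensitively (objective: alternative).

-- ===== PORT A =====
def string_comparison (a : String) (b : String) : Bool :=
  -- (i) convert to lower-case
  let a1 := PySem.Str.lower a
  let b1 := PySem.Str.lower b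
  -- (ii) eliminate error-prone characters
  let dropCharacters : List String := ["-", "/", "_", ","]
  let a2 := dropCharacters.foldl (fun s c => PySem.Str.replace s c "") a1
  let b2 := dropCharacters.foldl (fun s c => PySem.Str.replace s c "") b1
  -- (iii) eliminate all whitespaces
  let a3 := PySem.Str.replace a2 " " ""
  let b3 := PySem.Str.replace b2 " " ""
  a3 == b3

-- ===== PORT B =====
-- Source B's drop set, as a membership test
def scDrop (c : Char) : Bool := c == '-' || c == '/' || c == '_' || c == ',' || c == ' '

-- the inner 'while i < len(a) and a[i] in drop: i += 1' loops: advance past dropped chars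
def scSkip : List Char → List Char
  | [] => []
  | c :: t => if scDrop c then scSkip t else c :: t

theorem scSkip_length_le (l : List Char) : (scSkip l).length ≤ l.length := by
  induction l with
  | nil => simp [scSkip]
  | cons c t ih => by_cases h : scDrop c <;> simp [scSkip, h] <;> omega

-- the outer 'while True' loop of Source B, on the suffixes of a and b
def scAux (x y : List Char) : Bool :=
  match hx : scSkip x, hy : scSkip y with
  | [], [] => true
  | _ :: _, [] => false
  | [], _ :: _ => false
  | c :: xs, d :: ys =>
    (PySem.Chars.lowerChar c == PySem.Chars.lowerChar d) && scAux xs ys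
termination_by x.length
decreasing_by
  have := scSkip_length_le x
  rw [hx] at this
  simp at this; omega

def string_comparison_alt (a : String) (b : String) : Bool :=
  scAux a.toList b.toList

-- ===== PRECONDITION & SPEC =====
def Spec_string_comparison (a : String) (b : String) (out : Bool) : Prop := out = string_comparison_alt a b
instance (a : String) (b : String) (out : Bool) : Decidable (Spec_string_comparison a b out) := by unfold Spec_string_comparison; infer_instance

-- ===== CLAIM (what is proved, stated in full; the proofs are below) =====
def Claim_equal_string_comparison : Prop := ∀ (a : String) (b : String), Dom_string_comparison a b → Spec_string_comparison a b (string_comparison a b)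

-- ===== LEMMAS AND PROOFS =====

-- the cleaned form both programs compute: drop ignorable chars, lowercase the rest
def scClean (cs : List Char) : List Char :=
  (cs.filter (fun c => !scDrop c)).map PySem.Chars.lowerChar

-- lowering a character never moves it into or out of the drop set
theorem scDrop_lowerChar (c : Char) : scDrop (PySem.Chars.lowerChar c) = scDrop c := by
  unfold PySem.Chars.lowerChar
  by_cases h : PySem.Chars.isupper c = true
  · simp only [h, if_pos]
    have hb : 65 ≤ c.toNat ∧ c.toNat ≤ 90 := by
      simpa [PySem.Chars.isupper, Char.le_def] using h
    have hv : (Char.ofNat (c.toNat + 32)).toNat = c.toNat + 32 := by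
      have : Nat.isValidChar (c.toNat + 32) := Or.inl (by omega)
      simp [Char.ofNat, this]
    have hfalse : ∀ d : Char,
        (65 ≤ d.toNat ∧ d.toNat ≤ 90) ∨ (97 ≤ d.toNat ∧ d.toNat ≤ 122) → scDrop d = false := by
      intro d h1
      unfold scDrop
      simp only [Bool.or_eq_false_iff]
      refine ⟨⟨⟨⟨?_, ?_⟩, ?_⟩, ?_⟩, ?_⟩ <;>
        { apply Bool.eq_false_iff.mpr; intro he; simp at he; subst he; revert h1; decide }
    have g1 : scDrop (Char.ofNat (c.toNat + 32)) = false := by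
      apply hfalse; rw [hv]; omega
    have g2 : scDrop c = false := hfalse c (by omega)
    rw [g1, g2]
  · simp [h]

-- replace(s, c, "") is a filter
theorem replace_go_single (c : Char) (fuel : Nat) (l acc : List Char)
    (h : l.length ≤ fuel) :
    PySem.Chars.replace.go [c] [] fuel l acc
      = acc.reverse ++ l.filter (fun x => !(x == c)) := by
  induction fuel generalizing l acc with
  | zero =>
    have : l = [] := by cases l <;> simp_all
    subst this; simp [PySem.Chars.replace.go]
  | succ n ih =>
    cases l with
    | nil => simp [PySem.Chars.replace.go]
    | cons c' t =>
      rw [PySem.Chars.replace.go]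
      by_cases hc : c = c'
      · subst hc
        simp only [List.isPrefixOf, BEq.rfl, Bool.true_and, if_pos]
        rw [show List.drop [c].length (c :: t) = t from rfl,
          show ([] : List Char).reverse ++ acc = acc from rfl]
        rw [ih t acc (by simp at h; omega)]
        simp
      · have hpre : [c].isPrefixOf (c' :: t) = false := by
          simp [List.isPrefixOf]
          intro h'
          exact absurd (by simp_all) hc
        simp only [hpre, Bool.false_eq_true, if_neg, not_false_iff]
        rw [ih t (c' :: acc) (by simp at h; omega)]
        simp [Ne.symm hc]
theorem replace_single (c : Char) (cs : List Char) :
    PySem.Chars.replace cs [c] [] = cs.filter (fun x => !(x == c)) := by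
  rw [PySem.Chars.replace]
  simp [replace_go_single c cs.length cs [] (le_refl _)]

-- A's pipeline computes scClean
theorem pipeline_eq_scClean (cs : List Char) :
    ((((PySem.Chars.lower cs).filter (fun x => !(x == '-'))).filter (fun x => !(x == '/'))
        |>.filter (fun x => !(x == '_'))).filter (fun x => !(x == ','))).filter (fun x => !(x == ' '))
      = scClean cs := by
  unfold scClean
  rw [List.filter_filter, List.filter_filter, List.filter_filter, List.filter_filter]
  rw [PySem.Chars.lower, List.filter_map]
  refine congrArg (List.map PySem.Chars.lowerChar) ?_
  refine List.filter_congr (fun x _ => ?_)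
  simp only [Function.comp_apply]
  rw [← scDrop_lowerChar x]
  unfold scDrop
  cases PySem.Chars.lowerChar x == '-' <;> cases PySem.Chars.lowerChar x == '/' <;>
    cases PySem.Chars.lowerChar x == '_' <;> cases PySem.Chars.lowerChar x == ',' <;>
    cases PySem.Chars.lowerChar x == ' ' <;> rfl

theorem filter_scSkip (cs : List Char) :
    cs.filter (fun c => !scDrop c) = (scSkip cs).filter (fun c => !scDrop c) := by
  induction cs with
  | nil => rfl
  | cons c t ih => by_cases h : scDrop c <;> simp [scSkip, h, ih]

theorem scSkip_head_not_drop (cs : List Char) (c : Char) (t : List Char) (h : scSkip cs = c :: t) :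
    scDrop c = false := by
  induction cs with
  | nil => simp [scSkip] at h
  | cons c' t' ih =>
    by_cases h' : scDrop c' <;> simp [scSkip, h'] at h
    · exact ih h
    · rw [← h.1]; simpa using h'

-- B computes the comparison of the two cleaned strings
theorem scAux_eq_scClean (x y : List Char) : scAux x y = (scClean x == scClean y) := by
  induction x, y using scAux.induct with
  | case1 x y hx hy =>
    rw [scAux]; split <;>
      simp_all [scClean, filter_scSkip x, filter_scSkip y]
  | case2 x y c xs hx hy =>
    have hc := scSkip_head_not_drop x c xs hx
    rw [scAux]; split <;>
      simp_all [scClean, filter_scSkip x, filter_scSkip y]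
  | case3 x y d ys hx hy =>
    have hd := scSkip_head_not_drop y d ys hy
    rw [scAux]; split <;>
      simp_all [scClean, filter_scSkip x, filter_scSkip y]
  | case4 x y c xs d ys hx hy ih =>
    have hc := scSkip_head_not_drop x c xs hx
    have hd := scSkip_head_not_drop y d ys hy
    rw [scAux]; split <;>
      simp_all [scClean, filter_scSkip x, filter_scSkip y, List.cons_beq_cons]

theorem str_beq_toList (a b : String) : (a == b) = (a.toList == b.toList) := by
  rw [Bool.eq_iff_iff]
  constructor <;> intro h <;> simp_all [← String.toList_inj]

-- ===== VERDICT (by name: the statement is the Claim_ definition above) =====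
theorem string_comparison_spec : Claim_equal_string_comparison := by
  intro a b _
  unfold Spec_string_comparison string_comparison string_comparison_alt
  simp only [List.foldl]
  rw [str_beq_toList]
  simp only [PySem.Str.toList_replace, PySem.Str.toList_lower]
  have hnil : ("" : String).toList = [] := rfl
  simp only [hnil]
  have h1 : ("-" : String).toList = ['-'] := rfl
  have h2 : ("/" : String).toList = ['/'] := rfl
  have h3 : ("_" : String).toList = ['_'] := rfl
  have h4 : ("," : String).toList = [','] := rfl
  have h5 : (" " : String).toList = [' '] := rfl
  simp only [h1, h2, h3, h4, h5, replace_single]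
  rw [pipeline_eq_scClean, pipeline_eq_scClean, scAux_eq_scClean]
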